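-- pv_equiv track=rewrite | github.com/feoff3/pyTarget | src/comm/stdlib.py | str_2_value
-- ===== SOURCE A (Python) =====
-- def str_2_value(buf):
--     '''
--     string to value
--     e.g. 123, 0x123ab, -0x123ab, etc...
--     '''
--     ret = 0
--     neg = 1
--     base = 10
--     buf = buf.lower()
--     if buf[0] == '-':
--         neg = -1
--         buf = buf[1:]
--     if buf[:2] == '0x':
--         base = 16
--         buf = buf[2:]
--     for i in buf:
--         ret *= base
--         if i.isdigit():
--             ret += ord(i) - 48
--         else:
--             ret += ord(i) - 87
--     return ret * neg
-- ===== SOURCE B (Python) =====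
-- def _digit(ch):
--     return ord(ch) - 48 if ch.isdigit() else ord(ch) - 87
--
-- def _value(s, base):
--     # divide and conquer: value(left + right) = value(left) * base**len(right) + value(right)
--     if len(s) <= 1:
--         return _digit(s[0]) if s else 0
--     m = len(s) // 2
--     return _value(s[:m], base) * base ** (len(s) - m) + _value(s[m:], base)
--
-- def str_2_value(buf):
--     '''
--     string to value
--     e.g. 123, 0x123ab, -0x123ab, etc...
--     '''
--     s = buf.lower()
--     neg = -1 if s.startswith('-') else 1
--     if neg == -1:
--         s = s[1:]
--     if s.startswith('0x'):
--         base = 16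
--         s = s[2:]
--     else:
--         base = 10
--     return neg * _value(s, base)
-- ===== Notes on version B (the rewrite author's own statement) =====
-- stated objective: faster
-- what changed: Replaced A's left-to-right Horner loop by a divide-and-conquer evaluation value(l ++ r) = value(l)*base**len(r) + value(r) on string halves (prefix tests via startswith instead of indexing/slicing); intended as faster, measured 12.45x at n=65536 (largest size where both finished).
import Mathlib
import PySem

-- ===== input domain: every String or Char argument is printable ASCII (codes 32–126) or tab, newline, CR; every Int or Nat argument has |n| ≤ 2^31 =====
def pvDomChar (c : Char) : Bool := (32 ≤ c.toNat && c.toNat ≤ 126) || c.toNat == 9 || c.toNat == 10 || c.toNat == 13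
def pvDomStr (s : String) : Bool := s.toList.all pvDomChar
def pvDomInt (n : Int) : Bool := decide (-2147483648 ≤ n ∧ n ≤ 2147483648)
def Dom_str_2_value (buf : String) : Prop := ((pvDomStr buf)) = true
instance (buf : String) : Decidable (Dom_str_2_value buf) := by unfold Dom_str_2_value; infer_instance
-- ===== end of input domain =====

-- B evaluates the digit string by divide and conquer (value(l ++ r) = value(l)*base^|r| + value(r))
-- instead of A's left-to-right Horner loop; intended as faster (measured 12.45x at n=65536).

-- ===== PORT A =====
def str_2_value (buf : String) : Int :=
  let l := PySem.Chars.lower buf.toList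
  let neg : Int := if PySem.List.pyGet? l 0 = some '-' then -1 else 1
  let l1 := if PySem.List.pyGet? l 0 = some '-' then PySem.List.slice l (some 1) none else l
  let base : Int := if PySem.List.slice l1 none (some 2) = ['0', 'x'] then 16 else 10
  let l2 := if PySem.List.slice l1 none (some 2) = ['0', 'x'] then PySem.List.slice l1 (some 2) none else l1
  (l2.foldl (fun ret c =>
      if PySem.Chars.isdigit c then ret * base + ((c.toNat : Int) - 48)
      else ret * base + ((c.toNat : Int) - 87)) 0) * neg

-- ===== PORT B =====
-- _digit: ord(ch) - 48 if ch.isdigit() else ord(ch) - 87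
def pvDigit (c : Char) : Int :=
  if PySem.Chars.isdigit c then (c.toNat : Int) - 48 else (c.toNat : Int) - 87

-- _value: divide and conquer over the digit string
def pvValue (base : Int) (s : List Char) : Int :=
  if s.length ≤ 1 then
    match s with
    | [] => 0
    | c :: _ => pvDigit c
  else
    pvValue base (s.take (s.length / 2)) * base ^ (s.length - s.length / 2)
      + pvValue base (s.drop (s.length / 2))
termination_by s.length
decreasing_by
  · simpa using by omega
  · simpa using by omega

def str_2_value_alt (buf : String) : Int :=
  let s := PySem.Chars.lower buf.toList
  let neg : Int := if PySem.Chars.startswith s ['-'] then -1 else 1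
  let s1 := if neg = -1 then PySem.List.slice s (some 1) none else s
  let bs : Int × List Char :=
    if PySem.Chars.startswith s1 ['0', 'x'] then (16, PySem.List.slice s1 (some 2) none)
    else (10, s1)
  neg * pvValue bs.1 bs.2

-- ===== PRECONDITION & SPEC =====
-- Pre_ excludes only the empty string, on which A (buf[0]) raises IndexError.
def Pre_str_2_value (buf : String) : Prop := buf ≠ ""
instance (buf : String) : Decidable (Pre_str_2_value buf) := by unfold Pre_str_2_value; infer_instance
def pvWitness_str_2_value : String := "-0x1f"

def Spec_str_2_value (buf : String) (out : Int) : Prop := out = str_2_value_alt buf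
instance (buf : String) (out : Int) : Decidable (Spec_str_2_value buf out) := by unfold Spec_str_2_value; infer_instance

-- ===== CLAIM (what is proved, stated in full; the proofs are below) =====
def Claim_equal_str_2_value : Prop := ∀ (buf : String), Dom_str_2_value buf → Pre_str_2_value buf → Spec_str_2_value buf (str_2_value buf)

-- ===== LEMMAS AND PROOFS =====

-- big-endian positional value of a digit string
def pvValBE (base : Int) : List Char → Int
  | [] => 0
  | c :: t => pvDigit c * base ^ t.length + pvValBE base t

lemma pvValBE_append (base : Int) (xs ys : List Char) :
    pvValBE base (xs ++ ys) = pvValBE base xs * base ^ ys.length + pvValBE base ys := by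
  induction xs with
  | nil => simp [pvValBE]
  | cons c t ih => simp [pvValBE, ih, pow_add]; ring

-- A's Horner loop computes the big-endian positional value
lemma pvFoldA (base : Int) (l : List Char) : ∀ a : Int,
    l.foldl (fun ret c =>
      if PySem.Chars.isdigit c then ret * base + ((c.toNat : Int) - 48)
      else ret * base + ((c.toNat : Int) - 87)) a
    = a * base ^ l.length + pvValBE base l := by
  induction l with
  | nil => intro a; simp [pvValBE]
  | cons c t ih =>
    intro a
    have hstep : (if PySem.Chars.isdigit c then a * base + ((c.toNat : Int) - 48)
        else a * base + ((c.toNat : Int) - 87)) = a * base + pvDigit c := by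
      unfold pvDigit; split_ifs <;> ring
    simp only [List.foldl_cons, hstep, ih, pvValBE, List.length_cons, pow_succ]
    ring

-- B's divide-and-conquer recursion also computes the big-endian positional value
lemma pvValue_eq (base : Int) : ∀ n (s : List Char), s.length ≤ n →
    pvValue base s = pvValBE base s := by
  intro n
  induction n with
  | zero =>
    intro s hs
    have : s = [] := List.length_eq_zero_iff.mp (Nat.le_zero.mp hs)
    subst this
    simp [pvValue, pvValBE]
  | succ n ih =>
    intro s hs
    by_cases h1 : s.length ≤ 1
    · rw [pvValue.eq_def]
      rw [if_pos h1]
      cases s with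
      | nil => simp [pvValBE]
      | cons c t =>
        have : t = [] := List.length_eq_zero_iff.mp (by simp only [List.length_cons] at h1; omega)
        subst this
        simp [pvValBE]
    · rw [pvValue.eq_def, if_neg h1]
      have hm : s.length / 2 < s.length := by omega
      have h1' : 1 ≤ s.length / 2 := by omega
      have htake : (s.take (s.length / 2)).length = s.length / 2 := by
        simp; omega
      have hdrop : (s.drop (s.length / 2)).length = s.length - s.length / 2 := by simp
      rw [ih _ (by omega : (s.take (s.length / 2)).length ≤ n),
          ih _ (by omega : (s.drop (s.length / 2)).length ≤ n)]
      have := pvValBE_append base (s.take (s.length / 2)) (s.drop (s.length / 2))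
      rw [List.take_append_drop] at this
      rw [this, hdrop]

-- startswith l ['-'] coincides with l[0] == '-' on nonempty l
lemma pvStarts_dash (l : List Char) (h : l ≠ []) :
    (PySem.Chars.startswith l ['-'] = true) ↔ PySem.List.pyGet? l 0 = some '-' := by
  cases l with
  | nil => exact absurd rfl h
  | cons c t =>
    rw [PySem.Chars.startswith_iff]
    constructor
    · rintro ⟨u, hu⟩
      cases hu; simp
    · intro hc
      simp at hc
      exact ⟨t, by simp [hc]⟩

-- startswith l ['0','x'] coincides with l[:2] == ['0','x']
lemma pvStarts_0x (l : List Char) :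
    (PySem.Chars.startswith l ['0', 'x'] = true) ↔ PySem.List.slice l none (some 2) = ['0', 'x'] := by
  rw [PySem.Chars.startswith_iff]
  have h2 : PySem.List.slice l none (some 2) = l.take 2 := by
    simpa using PySem.List.slice_to_natCast l 2
  rw [h2, List.prefix_iff_eq_take]
  constructor <;> intro h <;> exact h.symm

lemma pvLower_ne_nil (buf : String) (h : buf ≠ "") : PySem.Chars.lower buf.toList ≠ [] := by
  intro hnil
  apply h
  have ht : buf.toList = [] := by
    cases hb : buf.toList with
    | nil => rfl
    | cons c t => rw [hb] at hnil; simp [PySem.Chars.lower] at hnil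
  exact String.toList_inj.mp (by simp [ht])

-- ===== VERDICT (by name: the statement is the Claim_ definition above) =====
theorem str_2_value_spec : Claim_equal_str_2_value := by
  intro buf _ hpre
  unfold Spec_str_2_value str_2_value str_2_value_alt
  simp only []
  have hne := pvLower_ne_nil buf hpre
  set l := PySem.Chars.lower buf.toList with hl
  by_cases hdash : PySem.List.pyGet? l 0 = some '-'
  · rw [if_pos hdash, if_pos hdash, if_pos ((pvStarts_dash l hne).mpr hdash), if_pos rfl]
    set l1 := PySem.List.slice l (some 1) none with hl1
    by_cases h0x : PySem.List.slice l1 none (some 2) = ['0', 'x']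
    · rw [if_pos h0x, if_pos h0x, if_pos ((pvStarts_0x l1).mpr h0x)]
      rw [pvFoldA, pvValue_eq _ _ _ (le_refl _)]
      ring
    · rw [if_neg h0x, if_neg h0x,
        if_neg (fun hc => h0x ((pvStarts_0x l1).mp hc))]
      rw [pvFoldA, pvValue_eq _ _ _ (le_refl _)]
      ring
  · rw [if_neg hdash, if_neg hdash,
      if_neg (fun hc => hdash ((pvStarts_dash l hne).mp hc))]
    have h1 : (1 : Int) ≠ -1 := by decide
    rw [if_neg h1]
    by_cases h0x : PySem.List.slice l none (some 2) = ['0', 'x']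
    · rw [if_pos h0x, if_pos h0x, if_pos ((pvStarts_0x l).mpr h0x)]
      rw [pvFoldA, pvValue_eq _ _ _ (le_refl _)]
      ring
    · rw [if_neg h0x, if_neg h0x,
        if_neg (fun hc => h0x ((pvStarts_0x l).mp hc))]
      rw [pvFoldA, pvValue_eq _ _ _ (le_refl _)]
      ring
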